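-- pv_equiv track=rewrite | github.com/IES-Rafael-Alberti/dawb1-2425-ejercicios-u2-HRjuan580 | src/ejercicio.py | generar_creciente
-- ===== SOURCE A (Python) =====
-- def generar_creciente(num: int) -> str:
--     serie = ""
--
--     for i in range(0, num, 1):
--         serie += f"{i} => "
--         total = 0
--         for j in range(0, i + 1):
--             total += j
--             serie += f"{j} + "
--         serie = serie[:-2] + f" = {total}\n"
--
--
--     return serie
-- ===== SOURCE B (Python) =====
-- def generar_creciente(num: int) -> str:
--     lines = []
--     terminos = ""
--     total = 0
--     for i in range(num):
--         terminos = "0" if i == 0 else terminos + f" + {i}"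
--         total += i
--         lines.append(f"{i} => {terminos}  = {total}\n")
--     return "".join(lines)
-- ===== Notes on version B (the rewrite author's own statement) =====
-- stated objective: faster
-- what changed: Replaced the nested loop that rebuilds the term string from scratch for every i by a single pass that incrementally extends a running terms string and running total, collecting lines and joining once (no slicing of the growing result).
import Mathlib
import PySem

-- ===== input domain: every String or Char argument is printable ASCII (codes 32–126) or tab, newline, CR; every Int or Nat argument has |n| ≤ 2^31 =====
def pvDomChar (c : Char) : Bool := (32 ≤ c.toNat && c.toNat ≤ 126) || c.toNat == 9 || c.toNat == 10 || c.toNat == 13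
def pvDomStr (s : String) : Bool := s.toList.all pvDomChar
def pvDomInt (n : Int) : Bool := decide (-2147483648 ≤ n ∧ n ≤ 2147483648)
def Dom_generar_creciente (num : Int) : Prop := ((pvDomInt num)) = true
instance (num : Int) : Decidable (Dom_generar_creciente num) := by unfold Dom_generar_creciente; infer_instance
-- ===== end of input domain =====

-- B replaces A's nested loop (rebuilding the term string for every i, then slicing) by one
-- incremental pass keeping a running terms string and total; measurably faster (asymptotic).

-- ===== PORT A =====
-- one outer-loop iteration of A: append "i => ", run the inner j-loop on (total, serie),
-- then serie = serie[:-2] + f" = {total}\n"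
def pvStepA (serie : List Char) (i : Int) : List Char :=
  let serie := serie ++ PySem.Int.toChars i ++ " => ".toList
  let p := (PySem.List.pyRange 0 (i+1) 1).foldl
    (fun (p : Int × List Char) j => (p.1 + j, p.2 ++ PySem.Int.toChars j ++ " + ".toList))
    ((0 : Int), serie)
  PySem.List.slice p.2 none (some (-2)) ++ " = ".toList ++ PySem.Int.toChars p.1 ++ ['\n']

def generar_creciente (num : Int) : String :=
  String.ofList ((PySem.List.pyRange 0 num 1).foldl pvStepA [])

-- ===== PORT B =====
-- one iteration of B over state (lines, terminos, total)
def pvStepB (st : List (List Char) × List Char × Int) (i : Int) :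
    List (List Char) × List Char × Int :=
  let terminos := if i = 0 then ['0'] else st.2.1 ++ " + ".toList ++ PySem.Int.toChars i
  let total := st.2.2 + i
  (st.1 ++ [PySem.Int.toChars i ++ " => ".toList ++ terminos ++ "  = ".toList
            ++ PySem.Int.toChars total ++ ['\n']],
   terminos, total)

def generar_creciente_alt (num : Int) : String :=
  String.ofList (((PySem.List.pyRange 0 num 1).foldl pvStepB ([], [], 0)).1.flatten)

-- ===== PRECONDITION & SPEC =====
def Spec_generar_creciente (num : Int) (out : String) : Prop := out = generar_creciente_alt num
instance (num : Int) (out : String) : Decidable (Spec_generar_creciente num out) := by unfold Spec_generar_creciente; infer_instance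

-- ===== CLAIM (what is proved, stated in full; the proofs are below) =====
def Claim_equal_generar_creciente : Prop := ∀ (num : Int), Dom_generar_creciente num → Spec_generar_creciente num (generar_creciente num)

-- ===== LEMMAS AND PROOFS =====

-- the terms string "0 + 1 + … + n"
def pvT : Nat → List Char
  | 0 => ['0']
  | n+1 => pvT n ++ " + ".toList ++ PySem.Int.toChars ((n : Int) + 1)

-- the running total after processing i = 0 … n-1
def pvS : Nat → Int
  | 0 => 0
  | n+1 => pvS n + (n : Int)

-- B's terminos after n iterations
def pvTz : Nat → List Char
  | 0 => []
  | n+1 => pvT n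

-- A's inner loop over range(0, m+1) from (t, s)
lemma pvInner (m : Nat) (s : List Char) (t : Int) :
    (PySem.List.pyRange 0 ((m : Int) + 1) 1).foldl
      (fun (p : Int × List Char) j => (p.1 + j, p.2 ++ PySem.Int.toChars j ++ " + ".toList))
      (t, s)
    = (t + pvS (m + 1), s ++ pvT m ++ " + ".toList) := by
  induction m generalizing s t with
  | zero =>
      rw [show ((0 : Nat) : Int) + 1 = 0 + 1 by norm_num, PySem.List.pyRange_one_singleton]
      simp [pvS, pvT, show PySem.Int.toChars 0 = ['0'] from by decide]
  | succ n ih =>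
      rw [show ((n + 1 : Nat) : Int) + 1 = ((n : Int) + 1) + 1 by push_cast; ring,
          PySem.List.pyRange_one_succ_right (by positivity), List.foldl_append, ih]
      simp only [List.foldl_cons, List.foldl_nil, pvS, pvT, Prod.mk.injEq]
      refine ⟨by push_cast; ring, by simp [List.append_assoc]⟩

-- one outer iteration of A from serie = s at i = m
lemma pvTake2 (xs : List Char) (a b c : Char) :
    List.take ((xs ++ [a,b,c]).length - 2) (xs ++ [a,b,c]) = xs ++ [a] := by
  rw [show (xs ++ [a,b,c]).length = xs.length + 3 by simp,
      show xs.length + 3 - 2 = xs.length + 1 by omega, List.take_append]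
  simp

lemma pvStepA_eq (s : List Char) (m : Nat) :
    pvStepA s (m : Int)
    = s ++ PySem.Int.toChars (m : Int) ++ " => ".toList ++ pvT m ++ "  = ".toList
        ++ PySem.Int.toChars (pvS (m + 1)) ++ ['\n'] := by
  simp only [pvStepA]
  rw [pvInner]
  rw [PySem.List.slice_to_neg_ofNat _ 2 (by omega)]
  rw [show s ++ PySem.Int.toChars (m : Int) ++ " => ".toList ++ pvT m ++ " + ".toList
      = (s ++ PySem.Int.toChars (m : Int) ++ " => ".toList ++ pvT m) ++ [' ', '+', ' ']
      by simp only [List.append_assoc]; rfl]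
  rw [pvTake2]
  simp [List.append_assoc]

-- one iteration of B, the lets written out
lemma pvStepB_def (st : List (List Char) × List Char × Int) (i : Int) :
    pvStepB st i
    = (st.1 ++ [PySem.Int.toChars i ++ " => ".toList
          ++ (if i = 0 then ['0'] else st.2.1 ++ " + ".toList ++ PySem.Int.toChars i)
          ++ "  = ".toList ++ PySem.Int.toChars (st.2.2 + i) ++ ['\n']],
       (if i = 0 then ['0'] else st.2.1 ++ " + ".toList ++ PySem.Int.toChars i),
       st.2.2 + i) := rfl

-- main invariant: both folds over range(n) agree, and B's state is (pvTz n, pvS n)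
lemma pvMain (n : Nat) :
    ((PySem.List.pyRange 0 (n : Int) 1).foldl pvStepA []
        = (((PySem.List.pyRange 0 (n : Int) 1).foldl pvStepB ([], [], 0)).1).flatten)
    ∧ ((PySem.List.pyRange 0 (n : Int) 1).foldl pvStepB ([], [], 0)).2.1 = pvTz n
    ∧ ((PySem.List.pyRange 0 (n : Int) 1).foldl pvStepB ([], [], 0)).2.2 = pvS n := by
  induction n with
  | zero => simp [PySem.List.pyRange_one_eq_nil, pvTz, pvS]
  | succ n ih =>
      obtain ⟨h1, h2, h3⟩ := ih
      rw [show ((n + 1 : Nat) : Int) = (n : Int) + 1 by push_cast; ring,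
          PySem.List.pyRange_one_succ_right (by positivity)]
      set b := (PySem.List.pyRange 0 (n : Int) 1).foldl pvStepB ([], [], 0) with hb
      have ht : (if (n : Int) = 0 then ['0']
          else b.2.1 ++ " + ".toList ++ PySem.Int.toChars (n : Int)) = pvT n := by
        cases n with
        | zero => simp [pvT]
        | succ k =>
            rw [if_neg (by positivity), h2]
            simp only [pvTz, pvT]
            push_cast
            rfl
      have hstep : pvStepB b ((n : Int))
          = (b.1 ++ [PySem.Int.toChars (n : Int) ++ " => ".toList ++ pvT n ++ "  = ".toList
                ++ PySem.Int.toChars (pvS (n + 1)) ++ ['\n']],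
             pvT n, pvS (n + 1)) := by
        rw [pvStepB_def, ht, h3]
        rfl
      rw [List.foldl_append, List.foldl_append, List.foldl_cons, List.foldl_nil,
          List.foldl_cons, List.foldl_nil, ← hb, hstep, pvStepA_eq, h1]
      refine ⟨?_, rfl, rfl⟩
      simp [List.flatten_append, List.append_assoc]

-- ===== VERDICT (by name: the statement is the Claim_ definition above) =====
theorem generar_creciente_spec : Claim_equal_generar_creciente := by
  intro num _
  unfold Spec_generar_creciente generar_creciente generar_creciente_alt
  by_cases h : num ≤ 0
  · rw [PySem.List.pyRange_one_eq_nil h]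
    rfl
  · obtain ⟨n, rfl⟩ : ∃ n : Nat, num = (n : Int) :=
      ⟨num.toNat, (Int.toNat_of_nonneg (by omega)).symm⟩
    rw [(pvMain n).1]
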